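-- pv_equiv track=rewrite | github.com/nakoibes/algorithms | longest_monotonous_subsequence.py | find_longest_monotonous_2
-- ===== SOURCE A (Python) =====
-- def find_longest_monotonous_2(sequence: list):
--     left_asc = 0
--     left_desc = 0
--     longest_asc = 0
--     longest_desc = 0
--     best_left_acs = 0
--     best_left_desc = 0
--     best_right_acs = 0
--     best_right_desc = 0
--     for i in range(len(sequence) - 1):
--         if sequence[i + 1] > sequence[i]:
--             if i + 1 - left_asc + 1 > longest_asc:
--                 longest_asc = i + 1 - left_asc + 1
--                 best_left_acs = left_asc
--                 best_right_acs = i + 1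
--             left_desc = i + 1
--         elif sequence[i + 1] < sequence[i]:
--             if i + 1 - left_desc + 1 > longest_desc:
--                 longest_desc = i + 1 - left_desc + 1
--                 best_left_desc = left_desc
--                 best_right_desc = i + 1
--             left_asc = i + 1
--         else:
--             left_asc = i + 1
--             left_desc = i + 1
--
--     if longest_asc > longest_desc:
--         return best_left_acs, best_right_acs
--     else:
--         return best_left_desc, best_right_desc
-- ===== SOURCE B (Python) =====
-- def _sign(a, b):
--     if b > a:
--         return 1
--     if b < a:
--         return -1
--     return 0
--
--
-- def find_longest_monotonous_2(sequence: list):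
--     # 1) pairwise comparison signs
--     s = [_sign(a, b) for a, b in zip(sequence, sequence[1:])]
--     # 2) group the sign list into maximal runs (value, start, length)
--     runs = []
--     i = 0
--     while i < len(s):
--         j = i
--         while j < len(s) and s[j] == s[i]:
--             j += 1
--         runs.append((s[i], i, j - i))
--         i = j
--     # 3) pick the first longest ascending run and the first longest descending run
--     best_asc = (0, 0, 0)   # (element count, left, right)
--     best_desc = (0, 0, 0)
--     for v, start, length in runs:
--         if v == 1 and length + 1 > best_asc[0]:
--             best_asc = (length + 1, start, start + length)
--         elif v == -1 and length + 1 > best_desc[0]: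
--             best_desc = (length + 1, start, start + length)
--     if best_asc[0] > best_desc[0]:
--         return best_asc[1], best_asc[2]
--     return best_desc[1], best_desc[2]
-- ===== Notes on version B (the rewrite author's own statement) =====
-- stated objective: alternative
-- what changed: A's single interleaved 8-variable state machine is replaced by a build-then-scan pipeline: compute the pairwise comparison-sign list, group it into maximal runs, then scan the runs once to pick the first longest ascending and descending run.
import Mathlib
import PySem

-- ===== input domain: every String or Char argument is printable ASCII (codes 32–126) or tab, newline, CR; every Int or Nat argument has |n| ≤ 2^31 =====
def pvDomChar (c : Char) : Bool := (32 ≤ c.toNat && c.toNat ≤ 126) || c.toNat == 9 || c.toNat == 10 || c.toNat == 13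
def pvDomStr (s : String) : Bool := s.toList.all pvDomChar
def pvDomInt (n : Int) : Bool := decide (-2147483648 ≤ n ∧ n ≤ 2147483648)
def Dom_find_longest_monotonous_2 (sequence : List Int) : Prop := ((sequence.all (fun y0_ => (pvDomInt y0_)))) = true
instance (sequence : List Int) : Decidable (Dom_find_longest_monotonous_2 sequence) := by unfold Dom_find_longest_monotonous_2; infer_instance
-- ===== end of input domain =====

-- B re-implements A as a build-then-scan: pairwise sign list, grouped into maximal runs, then
-- a single scan over the runs picks the first longest ascending and descending run (alternative
-- decomposition, same O(n) cost). Proven equal to A's interleaved single-pass state machine.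

-- ===== PORT A =====
-- A's loop body: state = (left_asc, left_desc, longest_asc, longest_desc,
--                         best_left_acs, best_right_acs, best_left_desc, best_right_desc)
def pvStepA (sequence : List Int)
    (st : Int × Int × Int × Int × Int × Int × Int × Int) (i : Int) :
    Int × Int × Int × Int × Int × Int × Int × Int :=
  let (la, ld, LA, LD, bla, bra, bld, brd) := st
  -- i ranges over range(len(sequence)-1), so both indices are in range and pyGet? is `some`;
  -- `.getD 0` only discharges the Option and is never the default.
  let cur := (PySem.List.pyGet? sequence i).getD 0
  let nxt := (PySem.List.pyGet? sequence (i + 1)).getD 0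
  if nxt > cur then
    if i + 1 - la + 1 > LA then (la, i + 1, i + 1 - la + 1, LD, la, i + 1, bld, brd)
    else (la, i + 1, LA, LD, bla, bra, bld, brd)
  else if nxt < cur then
    if i + 1 - ld + 1 > LD then (i + 1, ld, LA, i + 1 - ld + 1, bla, bra, ld, i + 1)
    else (i + 1, ld, LA, LD, bla, bra, bld, brd)
  else (i + 1, i + 1, LA, LD, bla, bra, bld, brd)

-- the final `if longest_asc > longest_desc` return
def pvFinalA (st : Int × Int × Int × Int × Int × Int × Int × Int) : Int × Int :=
  let (_, _, LA, LD, bla, bra, bld, brd) := st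
  if LA > LD then (bla, bra) else (bld, brd)

def find_longest_monotonous_2 (sequence : List Int) : Int × Int :=
  pvFinalA ((PySem.List.pyRange 0 ((sequence.length : Int) - 1) 1).foldl
    (pvStepA sequence) (0, 0, 0, 0, 0, 0, 0, 0))

-- ===== PORT B =====
def pySign (a b : Int) : Int := if b > a then 1 else if b < a then -1 else 0

-- inner while loop: how far the leading run of value v extends
def leadRun (v : Int) : List Int → Nat
  | [] => 0
  | x :: t => if x = v then leadRun v t + 1 else 0

-- outer while loop: group the sign list into maximal runs (value, start, length)
def groupRuns : List Int → Int → List (Int × Int × Int)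
  | [], _ => []
  | x :: t, k =>
    let m := leadRun x t
    (x, k, (m : Int) + 1) :: groupRuns (t.drop m) (k + (m : Int) + 1)
termination_by s _ => s.length
decreasing_by simp

-- for-loop over the runs keeping best_asc and best_desc = (element count, left, right)
def pickRuns : List (Int × Int × Int) → Int × Int × Int → Int × Int × Int → Int × Int
  | [], ba, bd => if ba.1 > bd.1 then (ba.2.1, ba.2.2) else (bd.2.1, bd.2.2)
  | (v, s, len) :: rs, ba, bd =>
    if v = 1 ∧ len + 1 > ba.1 then pickRuns rs (len + 1, s, s + len) bd
    else if v = -1 ∧ len + 1 > bd.1 then pickRuns rs ba (len + 1, s, s + len)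
    else pickRuns rs ba bd

def find_longest_monotonous_2_alt (sequence : List Int) : Int × Int :=
  -- zip(sequence, sequence[1:]) ported as zipWith over sequence and sequence.drop 1 (exact)
  let s := List.zipWith pySign sequence (sequence.drop 1)
  pickRuns (groupRuns s 0) (0, 0, 0) (0, 0, 0)

-- ===== PRECONDITION & SPEC =====
def Spec_find_longest_monotonous_2 (sequence : List Int) (out : Int × Int) : Prop := out = find_longest_monotonous_2_alt sequence
instance (sequence : List Int) (out : Int × Int) : Decidable (Spec_find_longest_monotonous_2 sequence out) := by unfold Spec_find_longest_monotonous_2; infer_instance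

-- ===== CLAIM (what is proved, stated in full; the proofs are below) =====
def Claim_equal_find_longest_monotonous_2 : Prop := ∀ (sequence : List Int), Dom_find_longest_monotonous_2 sequence → Spec_find_longest_monotonous_2 sequence (find_longest_monotonous_2 sequence)

-- ===== LEMMAS AND PROOFS =====

-- A's loop, re-expressed as structural recursion over the sign list carried at index i
def loopS : List Int → Int → Int × Int × Int × Int × Int × Int × Int × Int → Int × Int
  | [], _, st => pvFinalA st
  | x :: t, i, (la, ld, LA, LD, bla, bra, bld, brd) =>
    if x > 0 then
      if i + 1 - la + 1 > LA then loopS t (i + 1) (la, i + 1, i + 1 - la + 1, LD, la, i + 1, bld, brd)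
      else loopS t (i + 1) (la, i + 1, LA, LD, bla, bra, bld, brd)
    else if x < 0 then
      if i + 1 - ld + 1 > LD then loopS t (i + 1) (i + 1, ld, LA, i + 1 - ld + 1, bla, bra, ld, i + 1)
      else loopS t (i + 1) (i + 1, ld, LA, LD, bla, bra, bld, brd)
    else loopS t (i + 1) (i + 1, i + 1, LA, LD, bla, bra, bld, brd)

lemma lead_decomp (v : Int) (t : List Int) :
    List.replicate (leadRun v t) v ++ t.drop (leadRun v t) = t := by
  induction t with
  | nil => rfl
  | cons x t ih =>
    by_cases h : x = v
    · subst h; simp [leadRun, List.replicate_succ, ih]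
    · simp [leadRun, h]

lemma head_drop_lead (v : Int) (t : List Int) :
    (t.drop (leadRun v t)).head? ≠ some v := by
  induction t with
  | nil => simp
  | cons x t ih =>
    by_cases h : x = v
    · subst h; simpa [leadRun] using ih
    · simp [leadRun, h]

lemma loopS_congr (t : List Int) {i i' : Int}
    {s s' : Int × Int × Int × Int × Int × Int × Int × Int}
    (hi : i = i') (hs : s = s') : loopS t i s = loopS t i' s' := by rw [hi, hs]

lemma pickRuns_congr (rs : List (Int × Int × Int)) {a a' b b' : Int × Int × Int}
    (ha : a = a') (hb : b = b') : pickRuns rs a b = pickRuns rs a' b' := by rw [ha, hb]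

lemma loopS_run_pos (m : Nat) : ∀ (t : List Int) (p k ld LA LD bla bra bld brd : Int),
    loopS (List.replicate (m + 1) 1 ++ t) p (k, ld, LA, LD, bla, bra, bld, brd)
    = loopS t (p + (m : Int) + 1)
        (k, p + (m : Int) + 1,
         if p + (m : Int) + 2 - k > LA then p + (m : Int) + 2 - k else LA, LD,
         if p + (m : Int) + 2 - k > LA then k else bla,
         if p + (m : Int) + 2 - k > LA then p + (m : Int) + 1 else bra, bld, brd) := by
  induction m with
  | zero =>
    intro t p k ld LA LD bla bra bld brd
    simp only [List.replicate, List.cons_append, List.nil_append, loopS]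
    norm_num
    split_ifs <;>
      refine loopS_congr t (by ring) ?_ <;>
      simp only [Prod.mk.injEq] <;> and_intros <;>
      first | trivial | omega
  | succ m ih =>
    intro t p k ld LA LD bla bra bld brd
    rw [List.replicate_succ, List.cons_append]
    simp only [loopS]
    norm_num
    split_ifs with h <;> rw [ih] <;>
      refine loopS_congr t (by push_cast; ring) ?_ <;>
      simp only [Prod.mk.injEq] <;> push_cast <;> split_ifs <;> and_intros <;>
      first | trivial | omega

lemma loopS_run_neg (m : Nat) : ∀ (t : List Int) (p k la LA LD bla bra bld brd : Int),
    loopS (List.replicate (m + 1) (-1) ++ t) p (la, k, LA, LD, bla, bra, bld, brd)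
    = loopS t (p + (m : Int) + 1)
        (p + (m : Int) + 1, k, LA,
         if p + (m : Int) + 2 - k > LD then p + (m : Int) + 2 - k else LD,
         bla, bra,
         if p + (m : Int) + 2 - k > LD then k else bld,
         if p + (m : Int) + 2 - k > LD then p + (m : Int) + 1 else brd) := by
  induction m with
  | zero =>
    intro t p k la LA LD bla bra bld brd
    simp only [List.replicate, List.cons_append, List.nil_append, loopS]
    norm_num
    split_ifs <;>
      refine loopS_congr t (by ring) ?_ <;>
      simp only [Prod.mk.injEq] <;> and_intros <;>
      first | trivial | omega
  | succ m ih =>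
    intro t p k la LA LD bla bra bld brd
    rw [List.replicate_succ, List.cons_append]
    simp only [loopS]
    norm_num
    split_ifs with h <;> rw [ih] <;>
      refine loopS_congr t (by push_cast; ring) ?_ <;>
      simp only [Prod.mk.injEq] <;> push_cast <;> split_ifs <;> and_intros <;>
      first | trivial | omega

lemma loopS_run_zero (m : Nat) : ∀ (t : List Int) (p la ld LA LD bla bra bld brd : Int),
    loopS (List.replicate (m + 1) 0 ++ t) p (la, ld, LA, LD, bla, bra, bld, brd)
    = loopS t (p + (m : Int) + 1)
        (p + (m : Int) + 1, p + (m : Int) + 1, LA, LD, bla, bra, bld, brd) := by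
  induction m with
  | zero =>
    intro t p la ld LA LD bla bra bld brd
    simp only [List.replicate, List.cons_append, List.nil_append, loopS]
    norm_num
  | succ m ih =>
    intro t p la ld LA LD bla bra bld brd
    rw [List.replicate_succ, List.cons_append]
    simp only [loopS]
    norm_num
    rw [ih]
    refine loopS_congr t (by push_cast; ring) ?_
    simp only [Prod.mk.injEq]
    push_cast
    and_intros <;> first | trivial | ring

lemma loopS_groups (n : Nat) : ∀ (s : List Int), s.length = n →
    ∀ (k la ld LA LD bla bra bld brd : Int),
    (∀ x ∈ s, x = 1 ∨ x = -1 ∨ x = 0) →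
    (s.head? = some 1 → la = k) → (s.head? = some (-1) → ld = k) →
    loopS s k (la, ld, LA, LD, bla, bra, bld, brd)
    = pickRuns (groupRuns s k) (LA, bla, bra) (LD, bld, brd) := by
  induction n using Nat.strong_induction_on with
  | _ n ih =>
    intro s hlen k la ld LA LD bla bra bld brd hmem hla hld
    match s with
    | [] =>
      rw [groupRuns]
      simp [loopS, pickRuns, pvFinalA]
    | x :: t =>
      have hx : x = 1 ∨ x = -1 ∨ x = 0 := hmem x (by simp)
      have hdec : x :: t = List.replicate (leadRun x t + 1) x ++ t.drop (leadRun x t) := by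
        rw [List.replicate_succ, List.cons_append]
        exact congrArg (x :: ·) (lead_decomp x t).symm
      have hlt : (t.drop (leadRun x t)).length < n := by
        simp only [List.length_drop]
        simp at hlen
        omega
      have hmem' : ∀ y ∈ t.drop (leadRun x t), y = 1 ∨ y = -1 ∨ y = 0 := by
        intro y hy; exact hmem y (by simp [List.mem_of_mem_drop hy])
      have hgroup : groupRuns (x :: t) k
          = (x, k, ((leadRun x t : Nat) : Int) + 1)
            :: groupRuns (t.drop (leadRun x t)) (k + (leadRun x t : Int) + 1) := by
        rw [groupRuns]
      rw [hgroup]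
      rcases hx with hx | hx | hx
      · -- ascending run
        have hlak : la = k := hla (by rw [hx]; rfl)
        subst hlak
        subst hx
        conv_lhs => rw [hdec]
        rw [loopS_run_pos, ih _ hlt _ rfl _ _ _ _ _ _ _ _ _ hmem'
          (fun h => absurd h (head_drop_lead 1 t)) (fun _ => rfl), pickRuns]
        norm_num
        split_ifs <;>
          first
          | (refine pickRuns_congr _ ?_ rfl <;> simp only [Prod.mk.injEq] <;>
              and_intros <;> first | trivial | omega)
          | (exfalso; omega)
          | rfl
      · -- descending run
        have hldk : ld = k := hld (by rw [hx]; rfl)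
        subst hldk
        subst hx
        conv_lhs => rw [hdec]
        rw [loopS_run_neg, ih _ hlt _ rfl _ _ _ _ _ _ _ _ _ hmem'
          (fun _ => rfl) (fun h => absurd h (head_drop_lead (-1) t)), pickRuns]
        norm_num
        split_ifs <;>
          first
          | (refine pickRuns_congr _ rfl ?_ <;> simp only [Prod.mk.injEq] <;>
              and_intros <;> first | trivial | omega)
          | (exfalso; omega)
          | rfl
      · -- equal run
        subst hx
        conv_lhs => rw [hdec]
        rw [loopS_run_zero, ih _ hlt _ rfl _ _ _ _ _ _ _ _ _ hmem'
          (fun _ => rfl) (fun _ => rfl), pickRuns]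
        norm_num

lemma pySign_mem (a b : Int) : pySign a b = 1 ∨ pySign a b = -1 ∨ pySign a b = 0 := by
  unfold pySign
  split_ifs <;> norm_num

lemma bridgeA (sequence : List Int) : ∀ (j : Nat),
    ∀ st, pvFinalA ((PySem.List.pyRange (j : Int) ((sequence.length : Int) - 1) 1).foldl
        (pvStepA sequence) st)
      = loopS ((List.zipWith pySign sequence (sequence.drop 1)).drop j) (j : Int) st := by
  intro j
  induction hfuel : sequence.length - 1 - j generalizing j with
  | zero =>
    intro st
    have h1 : ((sequence.length : Int) - 1) ≤ (j : Int) := by omega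
    rw [PySem.List.pyRange_one_eq_nil h1, List.drop_eq_nil_of_le (by simp [List.length_zipWith]; omega)]
    rfl
  | succ f ihf =>
    intro st
    have hj : j < sequence.length - 1 := by omega
    have hj' : (j : Int) < (sequence.length : Int) - 1 := by omega
    rw [PySem.List.pyRange_one_cons hj', List.foldl_cons]
    have hnext : ((j : Int) + 1) = ((j + 1 : Nat) : Int) := by push_cast; ring
    have hjs : j < sequence.length := by omega
    have hjs1 : j + 1 < sequence.length := by omega
    have hjz : j < (List.zipWith pySign sequence (sequence.drop 1)).length := by
      simp [List.length_zipWith]; omega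
    have hdrop : (List.zipWith pySign sequence (sequence.drop 1)).drop j
        = (List.zipWith pySign sequence (sequence.drop 1))[j]'hjz ::
          (List.zipWith pySign sequence (sequence.drop 1)).drop (j + 1) := by
      rw [List.getElem_cons_drop]
    have hgj : (List.zipWith pySign sequence (sequence.drop 1))[j]'hjz
        = pySign (sequence[j]'hjs) (sequence[j+1]'hjs1) := by
      simp [List.getElem_zipWith]
    have hget : (PySem.List.pyGet? sequence (j : Int)).getD 0 = sequence[j]'hjs := by
      rw [PySem.List.pyGet?_natCast]; simp [List.getElem?_eq_getElem hjs]
    have hget1 : (PySem.List.pyGet? sequence ((j : Int) + 1)).getD 0 = sequence[j+1]'hjs1 := by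
      rw [hnext, PySem.List.pyGet?_natCast]; simp [List.getElem?_eq_getElem hjs1]
    obtain ⟨la, ld, LA, LD, bla, bra, bld, brd⟩ := st
    rw [hnext, ihf (j + 1) (by omega), hdrop, hgj]
    rcases lt_trichotomy (sequence[j]'hjs) (sequence[j+1]'hjs1) with h | h | h
    · have hs : pySign (sequence[j]'hjs) (sequence[j+1]'hjs1) = 1 := by
        unfold pySign; split_ifs <;> omega
      rw [hs]
      simp only [loopS, pvStepA, hget, hget1]
      rw [if_pos (show sequence[j+1]'hjs1 > sequence[j]'hjs from h),
          if_pos (show (1 : Int) > 0 from by norm_num)]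
      split_ifs <;>
        refine loopS_congr _ (by push_cast; ring) (by push_cast; rfl)
    · have hs : pySign (sequence[j]'hjs) (sequence[j+1]'hjs1) = 0 := by
        unfold pySign; split_ifs <;> omega
      rw [hs]
      simp only [loopS, pvStepA, hget, hget1]
      rw [if_neg (show ¬ sequence[j+1]'hjs1 > sequence[j]'hjs from by omega),
          if_neg (show ¬ sequence[j+1]'hjs1 < sequence[j]'hjs from by omega),
          if_neg (show ¬ (0 : Int) > 0 from by norm_num),
          if_neg (show ¬ (0 : Int) < 0 from by norm_num)]
      push_cast
      rfl
    · have hs : pySign (sequence[j]'hjs) (sequence[j+1]'hjs1) = -1 := by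
        unfold pySign; split_ifs <;> omega
      rw [hs]
      simp only [loopS, pvStepA, hget, hget1]
      rw [if_neg (show ¬ sequence[j+1]'hjs1 > sequence[j]'hjs from by omega),
          if_pos (show sequence[j+1]'hjs1 < sequence[j]'hjs from h),
          if_neg (show ¬ (-1 : Int) > 0 from by norm_num),
          if_pos (show (-1 : Int) < 0 from by norm_num)]
      split_ifs <;>
        refine loopS_congr _ (by push_cast; ring) (by push_cast; rfl)

-- ===== VERDICT (by name: the statement is the Claim_ definition above) =====
theorem find_longest_monotonous_2_spec : Claim_equal_find_longest_monotonous_2 := by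
  intro sequence _
  unfold Spec_find_longest_monotonous_2 find_longest_monotonous_2 find_longest_monotonous_2_alt
  have h := bridgeA sequence 0 (0, 0, 0, 0, 0, 0, 0, 0)
  simp only [Nat.cast_zero, List.drop_zero] at h
  rw [h, loopS_groups _ _ rfl _ _ _ _ _ _ _ _ _
    (fun x hx => by
      obtain ⟨i, hi, rfl⟩ := List.getElem_of_mem hx
      rw [List.getElem_zipWith]
      exact pySign_mem _ _)
    (fun _ => rfl) (fun _ => rfl)]
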